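-- pv_equiv track=rewrite | github.com/Clarxnce/simple-python | data_structures_and_algorithms/big_o/O(n).py | funchallenge
-- ===== SOURCE A (Python) =====
-- def random_function():
--     pass
--
-- def funchallenge(input):
--     temp = 10 #O(1)
--     temp = temp +50 #O(1)
--     for i in range(len(input)): #O(n)
--         random_function() #O(n)
--         var = True #O(n)
--         temp += 1 #O(n)
--     return temp #O(1)
-- ===== SOURCE B (Python) =====
-- def funchallenge(input):
--     # closed form: 10 + 50, plus one per element
--     return 60 + len(input)
-- ===== Notes on version B (the rewrite author's own statement) =====
-- stated objective: faster
-- what changed: Replaced the per-element increment loop with the closed form 60 + len(input).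
import Mathlib
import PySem

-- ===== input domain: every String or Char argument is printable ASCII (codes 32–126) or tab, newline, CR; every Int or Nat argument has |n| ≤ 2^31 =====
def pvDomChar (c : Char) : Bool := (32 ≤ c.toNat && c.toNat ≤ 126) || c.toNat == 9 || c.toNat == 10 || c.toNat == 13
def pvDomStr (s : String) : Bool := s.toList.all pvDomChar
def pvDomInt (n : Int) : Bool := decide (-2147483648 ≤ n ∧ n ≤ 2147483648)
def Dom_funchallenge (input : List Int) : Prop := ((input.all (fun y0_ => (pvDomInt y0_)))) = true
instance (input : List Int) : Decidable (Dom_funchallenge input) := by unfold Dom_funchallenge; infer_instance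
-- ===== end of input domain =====

-- ===== PORT A =====
-- A: loop over range(len(input)) adding 1 each iteration to temp = 10 + 50
def funchallenge (input : List Int) : Int :=
  (PySem.List.pyRange 0 (input.length : Int) 1).foldl (fun temp _ => temp + 1) (10 + 50)

-- ===== PORT B =====
-- B: closed form, faster in a timing run
def funchallenge_alt (input : List Int) : Int := 60 + (input.length : Int)

-- ===== PRECONDITION & SPEC =====
def Spec_funchallenge (input : List Int) (out : Int) : Prop := out = funchallenge_alt input
instance (input : List Int) (out : Int) : Decidable (Spec_funchallenge input out) := by unfold Spec_funchallenge; infer_instance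

-- ===== CLAIM (what is proved, stated in full; the proofs are below) =====
def Claim_equal_funchallenge : Prop := ∀ (input : List Int), Dom_funchallenge input → Spec_funchallenge input (funchallenge input)

-- ===== LEMMAS AND PROOFS =====

-- ===== VERDICT (by name: the statement is the Claim_ definition above) =====
theorem foldl_add_one (l : List Int) (t : Int) : l.foldl (fun temp _ => temp + 1) t = t + l.length := by
  induction l generalizing t with
  | nil => simp
  | cons x xs ih => simp [List.foldl, ih]; omega

theorem funchallenge_spec : Claim_equal_funchallenge := by
  intro input _
  unfold Spec_funchallenge funchallenge funchallenge_alt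
  rw [foldl_add_one]
  have h : ((PySem.List.pyRange 0 (input.length : Int) 1).length : Int) = input.length := by
    rw [PySem.List.length_pyRange_one] <;> omega
  omega
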